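-- pv_equiv track=rewrite | github.com/kaine-veal/unipytasks | pythontasks/modules/genbank_chunk_dna.py | genbank_chunk_dna
-- ===== SOURCE A (Python) =====
-- def genbank_chunk_dna(dna_sequence, block_size=10, blocks_per_row=6):
--     dna_sequence = dna_sequence.replace("\n", "").lower() # Removes newlines from dna_sequence input and ensure the DNA sequence is always in lower case
--     line_width = block_size * blocks_per_row # Calculates and defines the total line width
--     chunks = [] # Create an empty list for formatted output
--
--     for position in range(0, len(dna_sequence), line_width): # Iterate over the DNA sequence in chunks of line_width
--         split = dna_sequence[position:position+line_width] # Takes 60 characters from the current position from the for loop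
--
--         blocks = [split[i:i+block_size] for i in range(0, len(split), block_size)] # Splits the 'split' chunk of 60 characters into blocks of 10 characters
--         block_str = " ".join(blocks) # Joins the blocks with a space
--
--         line_number = str(position+1).rjust(9) # Right-justifies the line number
--         chunks.append(f"{line_number} {block_str}") # Appends the formatted line to the chunks list
--
--     return "\n".join(chunks) # Joins all the formatted lines into a single formatted string
-- ===== SOURCE B (Python) =====
-- def genbank_chunk_dna(dna_sequence, block_size=10, blocks_per_row=6):
--     seq = dna_sequence.replace("\n", "").lower()
--     blocks = [seq[i:i + block_size] for i in range(0, len(seq), block_size)]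
--     rows = []
--     for g in range(0, len(blocks), blocks_per_row):
--         line_number = str(g * block_size + 1).rjust(9)
--         rows.append(line_number + " " + " ".join(blocks[g:g + blocks_per_row]))
--     return "\n".join(rows)
-- ===== Notes on version B (the rewrite author's own statement) =====
-- stated objective: simpler
-- what changed: B chunks the whole normalized sequence once into a flat list of block_size blocks and then groups that list blocks_per_row at a time (line number computed from the block index), instead of A's nested re-slicing of each line-width window into blocks.
-- outside the precondition, e.g. on genbank_chunk_dna('acgt', -2, -3): A returns '        1 ', B returns ''
import Mathlib
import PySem

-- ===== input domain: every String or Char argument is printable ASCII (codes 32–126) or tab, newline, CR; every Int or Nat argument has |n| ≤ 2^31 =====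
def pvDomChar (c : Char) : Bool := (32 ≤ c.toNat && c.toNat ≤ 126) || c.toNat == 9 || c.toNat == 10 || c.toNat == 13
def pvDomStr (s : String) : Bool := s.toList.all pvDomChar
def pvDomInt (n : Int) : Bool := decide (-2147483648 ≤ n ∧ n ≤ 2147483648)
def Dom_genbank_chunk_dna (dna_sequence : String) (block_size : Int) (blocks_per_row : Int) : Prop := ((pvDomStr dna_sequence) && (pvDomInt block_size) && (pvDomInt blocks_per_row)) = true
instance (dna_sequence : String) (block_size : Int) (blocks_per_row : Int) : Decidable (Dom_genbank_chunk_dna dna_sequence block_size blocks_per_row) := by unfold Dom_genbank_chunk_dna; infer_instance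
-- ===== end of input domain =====

-- B groups a single flat list of block_size blocks by blocks_per_row instead of A's nested per-line re-slicing; objective: simpler decomposition, same O(n) cost.


-- ===== PORT A =====
-- str.rjust(9) with the default fill (both Pythons call it identically); exact: Nat subtraction clamps like Python's no-op pad for long strings
def pvRjust9 (cs : List Char) : List Char := List.replicate (9 - cs.length) ' ' ++ cs

def genbank_chunk_dna (dna_sequence : String) (block_size : Int) (blocks_per_row : Int) : String :=
  let seq : List Char := PySem.Chars.lower (PySem.Chars.replace dna_sequence.toList ['\n'] [])
  let line_width : Int := block_size * blocks_per_row
  let chunks : List (List Char) :=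
    (PySem.List.pyRange 0 (seq.length : Int) line_width).foldl (fun acc position =>
      acc ++ [pvRjust9 (PySem.Int.toChars (position + 1)) ++ ' ' ::
        PySem.Chars.join [' ']
          ((PySem.List.pyRange 0 ((PySem.List.slice seq (some position) (some (position + line_width))).length : Int) block_size).map
            (fun i => PySem.List.slice (PySem.List.slice seq (some position) (some (position + line_width))) (some i) (some (i + block_size))))]) []
  String.ofList (PySem.Chars.join ['\n'] chunks)

-- ===== PORT B =====
def genbank_chunk_dna_alt (dna_sequence : String) (block_size : Int) (blocks_per_row : Int) : String :=
  let seq : List Char := PySem.Chars.lower (PySem.Chars.replace dna_sequence.toList ['\n'] [])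
  let blocks : List (List Char) :=
    (PySem.List.pyRange 0 (seq.length : Int) block_size).map
      (fun i => PySem.List.slice seq (some i) (some (i + block_size)))
  let rows : List (List Char) :=
    (PySem.List.pyRange 0 (blocks.length : Int) blocks_per_row).foldl (fun acc g =>
      acc ++ [pvRjust9 (PySem.Int.toChars (g * block_size + 1)) ++ ' ' ::
        PySem.Chars.join [' '] (PySem.List.slice blocks (some g) (some (g + blocks_per_row)))]) []
  String.ofList (PySem.Chars.join ['\n'] rows)

-- ===== PRECONDITION & SPEC =====
-- Pre_ excludes a zero block_size/blocks_per_row, where Python's range raises ValueError in both programs,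
-- and the both-negative corner, where A emits a line-number-only row per line-width window (an artefact of
-- negative range steps) while B formats no rows at all; mixed-sign inputs agree and stay inside Pre_.
def Pre_genbank_chunk_dna (dna_sequence : String) (block_size : Int) (blocks_per_row : Int) : Prop :=
  block_size ≠ 0 ∧ blocks_per_row ≠ 0 ∧ ¬(block_size < 0 ∧ blocks_per_row < 0)
instance (dna_sequence : String) (block_size : Int) (blocks_per_row : Int) : Decidable (Pre_genbank_chunk_dna dna_sequence block_size blocks_per_row) := by unfold Pre_genbank_chunk_dna; infer_instance

def pvWitness_genbank_chunk_dna : String × Int × Int := ("ACGTacgTA\ncgt", 3, 2)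

def Spec_genbank_chunk_dna (dna_sequence : String) (block_size : Int) (blocks_per_row : Int) (out : String) : Prop := out = genbank_chunk_dna_alt dna_sequence block_size blocks_per_row
instance (dna_sequence : String) (block_size : Int) (blocks_per_row : Int) (out : String) : Decidable (Spec_genbank_chunk_dna dna_sequence block_size blocks_per_row out) := by unfold Spec_genbank_chunk_dna; infer_instance

-- ===== CLAIM (what is proved, stated in full; the proofs are below) =====
def Claim_equal_genbank_chunk_dna : Prop := ∀ (dna_sequence : String) (block_size : Int) (blocks_per_row : Int), Dom_genbank_chunk_dna dna_sequence block_size blocks_per_row → Pre_genbank_chunk_dna dna_sequence block_size blocks_per_row → Spec_genbank_chunk_dna dna_sequence block_size blocks_per_row (genbank_chunk_dna dna_sequence block_size blocks_per_row)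

-- ===== LEMMAS AND PROOFS =====

-- proof-side chunker: pvChunk b l = successive blocks of size (b+1) of l
def pvChunk {α : Type} (b : Nat) : List α → List (List α)
  | [] => []
  | x :: xs => (x :: xs.take b) :: pvChunk b (xs.drop b)
  termination_by l => l.length
  decreasing_by simp

theorem pvChunk_nil {α : Type} (b : Nat) : pvChunk b ([] : List α) = [] := by
  rw [pvChunk]

theorem pvChunk_cons {α : Type} (b : Nat) (x : α) (xs : List α) :
    pvChunk b (x :: xs) = (x :: xs.take b) :: pvChunk b (xs.drop b) := by
  rw [pvChunk]


theorem pvChunk_drop {α : Type} (b k : Nat) (l : List α) :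
    pvChunk b (l.drop ((b + 1) * k)) = (pvChunk b l).drop k := by
  induction k generalizing l with
  | zero => simp
  | succ k ih =>
    cases l with
    | nil => simp [pvChunk_nil]
    | cons x xs =>
      rw [pvChunk_cons, List.drop_succ_cons,
        show (b + 1) * (k + 1) = (b + (b + 1) * k) + 1 by ring,
        List.drop_succ_cons, ← List.drop_drop, ih]

theorem pvChunk_take {α : Type} (b k : Nat) (l : List α) :
    pvChunk b (l.take ((b + 1) * k)) = (pvChunk b l).take k := by
  induction k generalizing l with
  | zero => simp [pvChunk_nil]
  | succ k ih =>
    cases l with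
    | nil => simp [pvChunk_nil]
    | cons x xs =>
      rw [pvChunk_cons, List.take_succ_cons,
        show (b + 1) * (k + 1) = (b + (b + 1) * k) + 1 by ring,
        List.take_succ_cons, pvChunk_cons, List.take_take, List.drop_take]
      simp [ih]

theorem pvChunk_length {α : Type} (b : Nat) (l : List α) :
    (pvChunk b l).length = (l.length + b) / (b + 1) := by
  induction l using pvChunk.induct b with
  | case1 => rw [pvChunk_nil]; simp [Nat.div_eq_of_lt]
  | case2 x xs ih =>
    rw [pvChunk_cons]
    simp only [List.length_cons, ih, List.length_drop]
    rw [show xs.length + 1 + b = xs.length + (b + 1) by omega,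
      Nat.add_div_right _ (by omega)]
    rcases Nat.le_total b xs.length with h | h
    · rw [show xs.length - b + b = xs.length by omega]
    · rw [show xs.length - b = 0 by omega]
      rw [Nat.div_eq_of_lt (by omega), Nat.div_eq_of_lt (by omega)]

theorem pvChunk_eq {α : Type} (b : Nat) (l : List α) :
    (List.range ((l.length + b) / (b + 1))).map
        (fun k => (l.drop ((b + 1) * k)).take (b + 1)) = pvChunk b l := by
  induction l using pvChunk.induct b with
  | case1 => rw [pvChunk_nil]; simp [Nat.div_eq_of_lt]
  | case2 x xs ih =>
    rw [pvChunk_cons]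
    rw [show (x :: xs).length + b = xs.length + (b + 1) by simp; omega,
      Nat.add_div_right _ (by omega), List.range_succ_eq_map, List.map_cons, List.map_map]
    congr 1
    rw [show xs.length / (b + 1) = ((xs.drop b).length + b) / (b + 1) by
      simp only [List.length_drop]
      rcases Nat.le_total b xs.length with h | h
      · rw [show xs.length - b + b = xs.length by omega]
      · rw [show xs.length - b = 0 by omega, Nat.div_eq_of_lt (by omega),
          Nat.div_eq_of_lt (by omega)]]
    rw [← ih]
    apply List.map_congr_left
    intro k _
    simp only [Function.comp_apply, List.drop_drop]
    rw [show (b + 1) * Nat.succ k = (b + (b + 1) * k) + 1 by simp [Nat.succ_eq_add_one]; ring, List.drop_succ_cons,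
      show b + (b + 1) * k = (b + 1) * k + b by ring]

theorem pvRange_eq (n L : Nat) (hL : 0 < L) :
    PySem.List.pyRange 0 (n : Int) (L : Int) =
      (List.range ((n + L - 1) / L)).map (fun k => ((L * k : Nat) : Int)) := by
  rw [PySem.List.pyRange_of_pos 0 (n : Int) (s := (L : Int)) (by exact_mod_cast hL)]
  have hcnt : (if (0 : Int) < (n : Int) then ((((n : Int)) - 0 + (L : Int) - 1) / (L : Int)).toNat else 0)
      = (n + L - 1) / L := by
    by_cases hn : n = 0
    · subst hn
      simp [Nat.div_eq_of_lt (show L - 1 < L by omega)]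
    · rw [if_pos (by exact_mod_cast Nat.pos_of_ne_zero hn)]
      rw [show ((n : Int) - 0 + (L : Int) - 1) = ((n + L - 1 : Nat) : Int) by omega]
      rw [show ((n + L - 1 : Nat) : Int) / ((L : Nat) : Int) = (((n + L - 1) / L : Nat) : Int) from
        (Int.natCast_ediv _ _).symm, Int.toNat_natCast]
  rw [hcnt]
  apply List.map_congr_left
  intro k _
  push_cast
  ring

theorem pvBlocks_eq (B : Nat) (hB : 0 < B) (l : List Char) :
    (PySem.List.pyRange 0 (l.length : Int) (B : Int)).map
        (fun i => PySem.List.slice l (some i) (some (i + (B : Int)))) = pvChunk (B - 1) l := by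
  obtain ⟨b, rfl⟩ : ∃ b, B = b + 1 := ⟨B - 1, by omega⟩
  rw [pvRange_eq l.length (b + 1) (by omega), List.map_map]
  simp only [Nat.add_sub_cancel]
  rw [show l.length + (b + 1) - 1 = l.length + b by omega]
  rw [← pvChunk_eq b l]
  apply List.map_congr_left
  intro k _
  simp only [Function.comp_apply]
  exact PySem.List.slice_natCast_add l ((b + 1) * k) (b + 1)

theorem pvCeil_div (n B P : Nat) (hB : 0 < B) (hP : 0 < P) :
    (n + B * P - 1) / (B * P) = ((n + B - 1) / B + P - 1) / P := by
  have e1 : ∀ (x d : Nat), 0 < x → 0 < d → (x + d - 1) / d = (x - 1) / d + 1 := by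
    intro x d hx hd
    rw [show x + d - 1 = (x - 1) + d by omega, Nat.add_div_right _ hd]
  by_cases hn : n = 0
  · subst hn
    have h1 : (B * P - 1) / (B * P) = 0 := Nat.div_eq_of_lt (by have := Nat.mul_pos hB hP; omega)
    have h2 : (B - 1) / B = 0 := Nat.div_eq_of_lt (by omega)
    have h3 : (P - 1) / P = 0 := Nat.div_eq_of_lt (by omega)
    rw [show 0 + B * P - 1 = B * P - 1 by omega, h1, show 0 + B - 1 = B - 1 by omega, h2,
      show 0 + P - 1 = P - 1 by omega, h3]
  · have hn' : 0 < n := Nat.pos_of_ne_zero hn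
    rw [e1 n (B * P) hn' (Nat.mul_pos hB hP), e1 n B hn' hB,
      e1 ((n - 1) / B + 1) P (Nat.succ_pos _) hP]
    rw [Nat.add_sub_cancel, Nat.div_div_eq_div_mul]

theorem pvRange_neg (n : Nat) (t : Int) (ht : t < 0) : PySem.List.pyRange 0 (n : Int) t = [] := by
  simp only [PySem.List.pyRange]
  split_ifs with h1 h2 h3 <;> simp_all <;> omega

theorem pvRange_zero_stop (t : Int) : PySem.List.pyRange 0 0 t = [] := by
  simp only [PySem.List.pyRange]
  split_ifs <;> simp_all

theorem genbank_chunk_dna_spec : Claim_equal_genbank_chunk_dna := by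
  intro dna bs bpr _ hpre
  obtain ⟨hbs0, hbpr0, hneg⟩ := hpre
  unfold Spec_genbank_chunk_dna
  by_cases hbs : 0 < bs
  case neg =>
    -- block_size < 0, hence blocks_per_row > 0: both programs produce no rows
    have hbs' : bs < 0 := by omega
    have hbpr' : 0 < bpr := by omega
    simp only [genbank_chunk_dna, genbank_chunk_dna_alt]
    rw [pvRange_neg _ _ (mul_neg_of_neg_of_pos hbs' hbpr'), pvRange_neg _ _ hbs']
    simp [pvRange_zero_stop]
  by_cases hbpr : 0 < bpr
  case neg =>
    -- block_size > 0, blocks_per_row < 0: both programs produce no rows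
    have hbpr' : bpr < 0 := by omega
    simp only [genbank_chunk_dna, genbank_chunk_dna_alt]
    rw [pvRange_neg _ _ (mul_neg_of_pos_of_neg hbs hbpr'), pvRange_neg _ _ hbpr']
    simp
  have h1 : 1 ≤ bs := hbs
  have h2 : 1 ≤ bpr := hbpr
  obtain ⟨b, rfl⟩ : ∃ b : Nat, bs = ((b + 1 : Nat) : Int) := ⟨bs.toNat - 1, by omega⟩
  obtain ⟨p, rfl⟩ : ∃ p : Nat, bpr = ((p + 1 : Nat) : Int) := ⟨bpr.toNat - 1, by omega⟩
  simp only [genbank_chunk_dna, genbank_chunk_dna_alt]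
  set s : List Char := PySem.Chars.lower (PySem.Chars.replace dna.toList ['\n'] [])
  rw [show ((b + 1 : Nat) : Int) * ((p + 1 : Nat) : Int) = (((b + 1) * (p + 1) : Nat) : Int) by
    push_cast; ring]
  simp only [pvBlocks_eq (b + 1) (by omega : 0 < b + 1), Nat.add_sub_cancel]
  simp only [PySem.List.foldl_append_singleton_eq_map, List.nil_append]
  rw [pvRange_eq s.length ((b + 1) * (p + 1)) (by positivity), pvChunk_length b s,
    pvRange_eq ((s.length + b) / (b + 1)) (p + 1) (by omega)]
  simp only [List.map_map]
  rw [show ((s.length + b) / (b + 1) + (p + 1) - 1) / (p + 1)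
      = (s.length + (b + 1) * (p + 1) - 1) / ((b + 1) * (p + 1)) by
    rw [pvCeil_div s.length (b + 1) (p + 1) (by omega) (by omega),
      show s.length + (b + 1) - 1 = s.length + b by omega]]
  refine congrArg _ (congrArg _ ?_)
  apply List.map_congr_left
  intro k _
  simp only [Function.comp_apply]
  rw [PySem.List.slice_natCast_add s ((b + 1) * (p + 1) * k) ((b + 1) * (p + 1)),
    PySem.List.slice_natCast_add (pvChunk b s) ((p + 1) * k) (p + 1),
    show (b + 1) * (p + 1) * k = (b + 1) * ((p + 1) * k) by ring,
    pvChunk_take b (p + 1) (s.drop ((b + 1) * ((p + 1) * k))),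
    pvChunk_drop b ((p + 1) * k) s,
    show (((b + 1) * ((p + 1) * k) : Nat) : Int) + 1
      = (((p + 1) * k : Nat) : Int) * ((b + 1 : Nat) : Int) + 1 by push_cast; ring]
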